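-- pv_equiv track=rewrite | github.com/emtithal123abd-max/ai-code-review-assignment | correct_task2.py | count_valid_emails
-- ===== SOURCE A (Python) =====
-- def count_valid_emails(emails):
--     count = 0
--     if not emails:
--         return 0
--
--     for email in emails:
--         if not isinstance(email, str):
--             continue
--         email = email.strip()
--         if email.count("@") != 1:
--             continue
--         if " " in email :
--             continue
--         username, host = email.split("@")
--         if not username or not host :
--             continue
--         if "." not in host or host.startswith(".") or host.endswith("."):
--             continue
--
--         count += 1
--
--     return count
-- ===== SOURCE B (Python) =====
-- def _host_scan(h):
--     # host part: no '@' or ' ', must contain a '.', must not start or end with '.'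
--     if not h or h[0] == '.':
--         return False
--     seen_dot = False
--     for i, c in enumerate(h):
--         if c == '@' or c == ' ':
--             return False
--         if c == '.':
--             if i == len(h) - 1:
--                 return False
--             seen_dot = True
--     return seen_dot
--
-- def _user_scan(e):
--     # username part: scan up to the first '@'; a ' ' or a missing '@' kills it
--     seen = False
--     for i, c in enumerate(e):
--         if c == '@':
--             return seen and _host_scan(e[i + 1:])
--         if c == ' ':
--             return False
--         seen = True
--     return False
--
-- def count_valid_emails(emails):
--     total = 0
--     for email in emails:
--         if isinstance(email, str) and _user_scan(email.strip()):
--             total += 1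
--     return total
-- ===== Notes on version B (the rewrite author's own statement) =====
-- stated objective: alternative
-- what changed: A's per-element cascade of whole-string passes (count('@'), ' ' in, split('@'), '.' in host, startswith/endswith) is replaced by a single left-to-right recursive scan of the stripped string that validates the username up to the first '@' and then the host in one traversal.
import Mathlib
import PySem

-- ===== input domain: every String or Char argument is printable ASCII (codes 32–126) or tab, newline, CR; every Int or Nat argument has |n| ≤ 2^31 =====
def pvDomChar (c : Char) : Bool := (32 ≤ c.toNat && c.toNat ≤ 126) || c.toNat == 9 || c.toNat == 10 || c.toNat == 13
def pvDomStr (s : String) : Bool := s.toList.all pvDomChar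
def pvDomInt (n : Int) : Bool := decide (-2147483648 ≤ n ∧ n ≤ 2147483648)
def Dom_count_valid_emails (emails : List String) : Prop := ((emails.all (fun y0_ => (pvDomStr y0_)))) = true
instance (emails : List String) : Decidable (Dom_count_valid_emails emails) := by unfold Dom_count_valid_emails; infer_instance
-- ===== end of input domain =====

-- B replaces A's per-element cascade of count/split/startswith string passes by a single
-- recursive left-to-right scan of the stripped string (alternative decomposition, similar cost).
-- The Lean argument type List String makes Python's isinstance(email, str) test always true;
-- both ports drop it.

-- ===== PORT A =====
-- loop body of A, one guard per Python 'continue'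
def aStep (count : Int) (email : String) : Int :=
  let email := PySem.Str.strip email
  if PySem.Str.count email "@" ≠ 1 then count
  else if PySem.Str.isIn " " email then count
  else
    match PySem.Str.split? email "@" with
    | some [username, host] =>
      if username = "" ∨ host = "" then count
      else if (!PySem.Str.isIn "." host || PySem.Str.startswith host "." || PySem.Str.endswith host ".") then count
      else count + 1
    | _ => count  -- unreachable: splitting on a separator that occurs exactly once yields two parts

def count_valid_emails (emails : List String) : Int :=
  if emails = [] then 0
  else emails.foldl aStep 0

-- ===== PORT B =====
-- scan of the host part (after the '@'): no '@' or ' ', a '.' required but not first or last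
def pvHostScan : List Char → Bool → Bool
  | [], seenDot => seenDot
  | c :: rest, seenDot =>
    if c = '@' ∨ c = ' ' then false
    else if c = '.' then (if rest = [] then false else pvHostScan rest true)
    else pvHostScan rest seenDot

def pvHostStart : List Char → Bool
  | [] => false
  | c :: rest => if c = '.' then false else pvHostScan (c :: rest) false

-- scan of the username part up to the first '@'
def pvUserScan : List Char → Bool → Bool
  | [], _ => false
  | c :: rest, seen =>
    if c = '@' then seen && pvHostStart rest
    else if c = ' ' then false
    else pvUserScan rest true

def bStep (total : Int) (email : String) : Int :=
  if pvUserScan (PySem.Str.strip email).toList false then total + 1 else total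

def count_valid_emails_alt (emails : List String) : Int :=
  emails.foldl bStep 0

-- ===== PRECONDITION & SPEC =====
def Spec_count_valid_emails (emails : List String) (out : Int) : Prop := out = count_valid_emails_alt emails
instance (emails : List String) (out : Int) : Decidable (Spec_count_valid_emails emails out) := by unfold Spec_count_valid_emails; infer_instance

-- ===== CLAIM (what is proved, stated in full; the proofs are below) =====
def Claim_equal_count_valid_emails : Prop := ∀ (emails : List String), Dom_count_valid_emails emails → Spec_count_valid_emails emails (count_valid_emails emails)

-- ===== LEMMAS AND PROOFS =====

-- Chars.count with a one-character separator is List.count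
lemma count_go_one (c : Char) : ∀ (l : List Char) (fuel acc : Nat), l.length ≤ fuel →
    PySem.Chars.count.go [c] fuel l acc = acc + l.count c := by
  intro l
  induction l with
  | nil => intro fuel acc _; cases fuel <;> simp [PySem.Chars.count.go]
  | cons x t ih =>
    intro fuel acc hle
    cases fuel with
    | zero => simp at hle
    | succ f =>
      have hstep : PySem.Chars.count.go [c] (f + 1) (x :: t) acc
          = if [c].isPrefixOf (x :: t) then PySem.Chars.count.go [c] f t (acc + 1)
            else PySem.Chars.count.go [c] f t acc := rfl
      have hpre : [c].isPrefixOf (x :: t) = (c == x) := by simp [List.isPrefixOf]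
      have hlen : t.length ≤ f := by simpa using hle
      by_cases hcx : c = x
      · rw [hstep, hpre, if_pos (by simp [hcx]), ih f (acc + 1) hlen]
        simp [hcx.symm]
        omega
      · rw [hstep, hpre, if_neg (by simp [hcx]), ih f acc hlen]
        simp [Ne.symm hcx]

lemma chars_count_singleton (c : Char) (cs : List Char) :
    PySem.Chars.count cs [c] = cs.count c := by
  unfold PySem.Chars.count
  rw [if_neg (by simp)]
  simpa using count_go_one c cs cs.length 0 (le_refl _)

-- splitOn.go on a separator-free tail
lemma split_go_none (c : Char) : ∀ (l : List Char), c ∉ l →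
    ∀ (fuel : Nat) (cur : List Char) (acc : List (List Char)), l.length < fuel →
    PySem.Chars.splitOn.go [c] fuel l cur acc = ((cur.reverse ++ l) :: acc).reverse := by
  intro l
  induction l with
  | nil =>
    intro _ fuel cur acc hf
    cases fuel with
    | zero => omega
    | succ f => simp [PySem.Chars.splitOn.go]
  | cons x t ih =>
    intro hn fuel cur acc hf
    cases fuel with
    | zero => omega
    | succ f =>
      have hstep : PySem.Chars.splitOn.go [c] (f + 1) (x :: t) cur acc
          = if [c].isPrefixOf (x :: t) then PySem.Chars.splitOn.go [c] f t [] (cur.reverse :: acc)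
            else PySem.Chars.splitOn.go [c] f t (x :: cur) acc := rfl
      have hcx : ¬ c = x := fun h => hn (h ▸ List.mem_cons_self)
      rw [hstep, if_neg (by simp [List.isPrefixOf, hcx]),
        ih (fun h => hn (List.mem_cons_of_mem _ h)) f (x :: cur) acc (by simpa using hf)]
      simp

-- splitOn.go across the single separator occurrence
lemma split_go_one (c : Char) : ∀ (u h : List Char), c ∉ u → c ∉ h →
    ∀ (fuel : Nat) (cur : List Char) (acc : List (List Char)), (u ++ c :: h).length < fuel →
    PySem.Chars.splitOn.go [c] fuel (u ++ c :: h) cur acc = acc.reverse ++ [cur.reverse ++ u, h] := by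
  intro u
  induction u with
  | nil =>
    intro h _ hh fuel cur acc hf
    cases fuel with
    | zero => simp at hf
    | succ f =>
      have hstep : PySem.Chars.splitOn.go [c] (f + 1) (c :: h) cur acc
          = if [c].isPrefixOf (c :: h) then PySem.Chars.splitOn.go [c] f h [] (cur.reverse :: acc)
            else PySem.Chars.splitOn.go [c] f h (c :: cur) acc := rfl
      simp only [List.nil_append] at hf ⊢
      rw [hstep, if_pos (by simp [List.isPrefixOf]),
        split_go_none c h hh f [] (cur.reverse :: acc) (by simpa using hf)]
      simp
  | cons x u' ih =>
    intro h hu hh fuel cur acc hf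
    cases fuel with
    | zero => simp at hf
    | succ f =>
      have hstep : PySem.Chars.splitOn.go [c] (f + 1) (x :: (u' ++ c :: h)) cur acc
          = if [c].isPrefixOf (x :: (u' ++ c :: h)) then
              PySem.Chars.splitOn.go [c] f (u' ++ c :: h) [] (cur.reverse :: acc)
            else PySem.Chars.splitOn.go [c] f (u' ++ c :: h) (x :: cur) acc := rfl
      have hcx : ¬ c = x := fun hcx => hu (hcx ▸ List.mem_cons_self)
      simp only [List.cons_append] at hf ⊢
      rw [hstep, if_neg (by simp [List.isPrefixOf, hcx]),
        ih h (fun hm => hu (List.mem_cons_of_mem _ hm)) hh f (x :: cur) acc (by simp at hf ⊢; omega)]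
      simp

lemma splitOn_pair (u h : List Char) (hu : '@' ∉ u) (hh : '@' ∉ h) :
    PySem.Chars.splitOn (u ++ '@' :: h) ['@'] = [u, h] := by
  unfold PySem.Chars.splitOn
  rw [split_go_one '@' u h hu hh _ [] [] (by omega)]
  simp

-- singleton prefix / suffix characterisations
lemma singleton_prefix_iff (a : Char) (l : List Char) : [a] <+: l ↔ l.head? = some a := by
  cases l with
  | nil => simp
  | cons x t => simp [List.cons_prefix_cons, eq_comm]

lemma singleton_suffix_iff (a : Char) (l : List Char) : [a] <:+ l ↔ l.getLast? = some a := by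
  rw [← List.reverse_prefix (l₁ := [a])]
  simpa [List.head?_reverse] using singleton_prefix_iff a l.reverse

-- B-side scan characterisations
lemma userScan_no_at (cs : List Char) (h : '@' ∉ cs) : ∀ seen, pvUserScan cs seen = false := by
  induction cs with
  | nil => intro seen; rfl
  | cons c rest ih =>
    intro seen
    have hc : ¬ c = '@' := fun hc => h (hc ▸ List.mem_cons_self)
    by_cases hs : c = ' '
    · simp [pvUserScan, hs]
    · simp [pvUserScan, hc, hs, ih (fun hm => h (List.mem_cons_of_mem _ hm))]

lemma hostScan_bad (h : List Char) (hm : '@' ∈ h ∨ ' ' ∈ h) : ∀ d, pvHostScan h d = false := by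
  induction h with
  | nil => rcases hm with hm | hm <;> simp at hm
  | cons c rest ih =>
    intro d
    by_cases hc : c = '@' ∨ c = ' '
    · simp [pvHostScan, hc]
    · have hm' : '@' ∈ rest ∨ ' ' ∈ rest := by
        rcases hm with hm | hm <;> rcases List.mem_cons.mp hm with h1 | h1
        · exact absurd (Or.inl h1.symm) hc
        · exact Or.inl h1
        · exact absurd (Or.inr h1.symm) hc
        · exact Or.inr h1
      have hrest : rest ≠ [] := by
        intro hr; subst hr; rcases hm' with hm' | hm' <;> simp at hm'
      by_cases hd : c = '.'
      · simp [pvHostScan, hd, hrest, ih hm']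
      · simp [pvHostScan, hc, hd, ih hm']

lemma hostStart_bad (h : List Char) (hm : '@' ∈ h ∨ ' ' ∈ h) : pvHostStart h = false := by
  cases h with
  | nil => rfl
  | cons c rest =>
    by_cases hd : c = '.'
    · simp [pvHostStart, hd]
    · simp [pvHostStart, hd, hostScan_bad _ hm false]

lemma hostScan_eq (h : List Char) (h1 : '@' ∉ h) (h2 : ' ' ∉ h) :
    ∀ d, pvHostScan h d = ((d || decide ('.' ∈ h)) && !decide (h.getLast? = some '.')) := by
  induction h with
  | nil => intro d; simp [pvHostScan]
  | cons c rest ih =>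
    intro d
    have hc : ¬ (c = '@' ∨ c = ' ') := by
      rintro (hc | hc) <;> [exact h1 (hc ▸ List.mem_cons_self); exact h2 (hc ▸ List.mem_cons_self)]
    have ih' := ih (fun hm => h1 (List.mem_cons_of_mem _ hm)) (fun hm => h2 (List.mem_cons_of_mem _ hm))
    have hstep : pvHostScan (c :: rest) d
        = if c = '@' ∨ c = ' ' then false
          else if c = '.' then (if rest = [] then false else pvHostScan rest true)
          else pvHostScan rest d := rfl
    rw [hstep, if_neg hc]
    by_cases hd : c = '.'
    · cases rest with
      | nil => subst hd; simp
      | cons y t => subst hd; rw [if_pos rfl, if_neg (by simp), ih' true]; simp [List.getLast?_cons_cons]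
    · cases rest with
      | nil => simp [pvHostScan, hd, Ne.symm hd]
      | cons y t => rw [if_neg hd, ih' d]; simp [Ne.symm hd, List.getLast?_cons_cons]

lemma hostStart_eq (h : List Char) (h1 : '@' ∉ h) (h2 : ' ' ∉ h) :
    pvHostStart h = (!h.isEmpty && !decide (h.head? = some '.') && decide ('.' ∈ h)
      && !decide (h.getLast? = some '.')) := by
  cases h with
  | nil => rfl
  | cons c rest =>
    by_cases hd : c = '.'
    · simp [pvHostStart, hd]
    · simp [pvHostStart, hd, hostScan_eq _ h1 h2 false, Ne.symm hd]

lemma userScan_decomp (u h : List Char) (hu : '@' ∉ u) :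
    ∀ seen, pvUserScan (u ++ '@' :: h) seen
      = if ' ' ∈ u then false else ((seen || !u.isEmpty) && pvHostStart h) := by
  induction u with
  | nil => intro seen; simp [pvUserScan]
  | cons x u' ih =>
    intro seen
    have hx : ¬ x = '@' := fun hx => hu (hx ▸ List.mem_cons_self)
    by_cases hs : x = ' '
    · simp [pvUserScan, hs]
    · rw [List.cons_append]
      simp only [pvUserScan, if_neg hx, if_neg hs,
        ih (fun hm => hu (List.mem_cons_of_mem _ hm)) true]
      simp [Ne.symm hs]

-- the first occurrence of '@' splits the string
lemma first_at (cs : List Char) (h : '@' ∈ cs) : ∃ u t, cs = u ++ '@' :: t ∧ '@' ∉ u := by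
  induction cs with
  | nil => simp at h
  | cons c rest ih =>
    by_cases hc : c = '@'
    · exact ⟨[], rest, by simp [hc], by simp⟩
    · rcases List.mem_cons.mp h with h1 | h1
      · exact absurd h1.symm hc
      · obtain ⟨u, t, rfl, hu⟩ := ih h1
        exact ⟨c :: u, t, rfl, by simp only [List.mem_cons, not_or]; exact ⟨Ne.symm hc, hu⟩⟩

-- the central per-string equivalence, at the level of character lists
lemma key (count : Int) (cs : List Char) :
    (if PySem.Chars.count cs ['@'] ≠ 1 then count
     else if PySem.Chars.isIn [' '] cs then count
     else
       match Option.map (fun x => List.map String.ofList x) (PySem.Chars.split? cs ['@']) with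
       | some [username, host] =>
         if username = "" ∨ host = "" then count
         else if (!PySem.Str.isIn "." host || PySem.Str.startswith host "." || PySem.Str.endswith host ".") then count
         else count + 1
       | _ => count)
    = (if pvUserScan cs false then count + 1 else count) := by
  rw [chars_count_singleton]
  by_cases hmem : '@' ∈ cs
  · obtain ⟨u, h, rfl, hu⟩ := first_at cs hmem
    have hcu : u.count '@' = 0 := List.count_eq_zero.mpr hu
    have hcount : (u ++ '@' :: h).count '@' = 1 + h.count '@' := by
      simp [List.count_append, hcu]; omega
    by_cases hone : h.count '@' = 0
    · -- exactly one '@'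
      have hh : '@' ∉ h := List.count_eq_zero.mp hone
      rw [if_neg (by omega)]
      by_cases hsp : ' ' ∈ (u ++ '@' :: h)
      · rw [if_pos (by
          exact PySem.Chars.isIn_iff_infix _ _ |>.mpr ((List.singleton_infix_iff _ _).mpr hsp))]
        have hsp' : ' ' ∈ u ∨ ' ' ∈ h := by
          rcases List.mem_append.mp hsp with h1 | h1
          · exact Or.inl h1
          · rcases List.mem_cons.mp h1 with h2 | h2
            · simp at h2
            · exact Or.inr h2
        rw [userScan_decomp u h hu false]
        rcases hsp' with h1 | h1
        · rw [if_pos h1]; simp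
        · rw [hostStart_bad h (Or.inr h1)]; split_ifs <;> simp_all
      · have hnotin : ¬ PySem.Chars.isIn [' '] (u ++ '@' :: h) = true := fun hx =>
          hsp ((List.singleton_infix_iff _ _).mp ((PySem.Chars.isIn_iff_infix _ _).mp hx))
        rw [if_neg hnotin]
        have hsplit : PySem.Chars.split? (u ++ '@' :: h) ['@'] = some [u, h] := by
          unfold PySem.Chars.split?
          rw [if_neg (by simp), splitOn_pair u h hu hh]
        rw [hsplit]
        simp only [Option.map_some, List.map_cons, List.map_nil]
        have hspu : ' ' ∉ u := fun hm => hsp (List.mem_append.mpr (Or.inl hm))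
        have hsph : ' ' ∉ h := fun hm => hsp (by simp [hm])
        rw [userScan_decomp u h hu false, if_neg hspu, hostStart_eq h hh hsph]
        have hueq : (String.ofList u = "" ∨ String.ofList h = "") ↔ (u = [] ∨ h = []) := by
          constructor
          · rintro (h1 | h1) <;> [left; right] <;>
              simpa using congrArg String.toList h1
          · rintro (rfl | rfl) <;> simp
        have hin : PySem.Str.isIn "." (String.ofList h) = decide ('.' ∈ h) := by
          unfold PySem.Str.isIn
          by_cases hd : '.' ∈ h
          · simp [hd, (PySem.Chars.isIn_iff_infix _ _).mpr ((List.singleton_infix_iff _ _).mpr (by simpa using hd))]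
          · have hne : ¬ PySem.Chars.isIn ['.'] h = true := fun hx =>
              hd ((List.singleton_infix_iff _ _).mp ((PySem.Chars.isIn_iff_infix _ _).mp hx))
            simp only [String.toList_ofList]
            simp [Bool.eq_false_iff.mpr hne, hd]
        have hst : PySem.Str.startswith (String.ofList h) "." = decide (h.head? = some '.') := by
          unfold PySem.Str.startswith
          by_cases hd : h.head? = some '.'
          · simp [hd, (PySem.Chars.startswith_iff _ _).mpr ((singleton_prefix_iff '.' h).mpr hd)]
          · have : PySem.Chars.startswith h ['.'] ≠ true := fun hc =>
              hd ((singleton_prefix_iff '.' h).mp ((PySem.Chars.startswith_iff _ _).mp hc))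
            simp only [String.toList_ofList]
            simp [Bool.not_eq_true] at this
            simp [this, hd]
        have hen : PySem.Str.endswith (String.ofList h) "." = decide (h.getLast? = some '.') := by
          unfold PySem.Str.endswith
          by_cases hd : h.getLast? = some '.'
          · simp [hd, (PySem.Chars.endswith_iff _ _).mpr ((singleton_suffix_iff '.' h).mpr hd)]
          · have : PySem.Chars.endswith h ['.'] ≠ true := fun hc =>
              hd ((singleton_suffix_iff '.' h).mp ((PySem.Chars.endswith_iff _ _).mp hc))
            simp only [String.toList_ofList]
            simp [Bool.not_eq_true] at this
            simp [this, hd]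
        rw [hin, hst, hen]
        by_cases h1 : u = [] <;> by_cases h2 : h = [] <;>
          by_cases h3 : '.' ∈ h <;> by_cases h4 : h.head? = some '.' <;>
          by_cases h5 : h.getLast? = some '.' <;>
          simp_all
    · -- at least two '@'
      have hh : '@' ∈ h := List.count_pos_iff.mp (Nat.pos_of_ne_zero hone)
      rw [if_pos (by omega)]
      rw [userScan_decomp u h hu false, hostStart_bad h (Or.inl hh)]
      split_ifs <;> simp_all
  · have hz : cs.count '@' = 0 := List.count_eq_zero.mpr hmem
    rw [if_pos (by omega), userScan_no_at cs hmem false]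
    simp

set_option maxHeartbeats 1000000 in
lemma step_eq (count : Int) (email : String) : aStep count email = bStep count email := by
  simp only [aStep, bStep]
  have h1 : PySem.Str.count (PySem.Str.strip email) "@"
      = PySem.Chars.count (PySem.Str.strip email).toList ['@'] := rfl
  have h2 : PySem.Str.isIn " " (PySem.Str.strip email)
      = PySem.Chars.isIn [' '] (PySem.Str.strip email).toList := rfl
  have h3 : PySem.Str.split? (PySem.Str.strip email) "@"
      = Option.map (fun x => List.map String.ofList x)
          (PySem.Chars.split? (PySem.Str.strip email).toList ['@']) := rfl
  rw [h1, h2, h3]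
  exact key count (PySem.Str.strip email).toList

set_option maxHeartbeats 1000000 in
lemma foldl_eq : ∀ (l : List String) (n : Int), l.foldl aStep n = l.foldl bStep n := by
  intro l
  induction l with
  | nil => intro n; rfl
  | cons x t ih => intro n; rw [List.foldl_cons, List.foldl_cons, step_eq, ih]

-- ===== VERDICT (by name: the statement is the Claim_ definition above) =====
theorem count_valid_emails_spec : Claim_equal_count_valid_emails := by
  intro emails _
  unfold Spec_count_valid_emails count_valid_emails count_valid_emails_alt
  cases emails with
  | nil => rfl
  | cons x t => rw [if_neg (by simp), foldl_eq]
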